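-- pv_equiv track=rewrite | github.com/PhysCourse/mkdocs-material-equation-plugin | mkdocs_preview_eq_plugin/mdparser.py | is_ending_spacing
-- ===== SOURCE A (Python) =====
-- def is_ending_spacing(content : str, start):
--     i = start
--     while(i < len(content)):
--         if(content[i] == '\n'):
--             return True
--         if content[i].isspace():
--             i += 1
--         else:
--             return False
--     return True
-- ===== SOURCE B (Python) =====
-- def is_ending_spacing(content: str, start):
--     rest = content[start:]
--     nl = rest.find('\n')
--     seg = rest if nl == -1 else rest[:nl]
--     return all(c.isspace() for c in seg)
-- ===== Notes on version B (the rewrite author's own statement) =====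
-- stated objective: idiomatic
-- what changed: Replaces A's fused index-walking while-loop by a slice-then-find decomposition: take the tail content[start:], locate the first newline with find, and test the segment before it with all(c.isspace()).
-- outside the precondition, e.g. on is_ending_spacing('ab ', -1): A returns False, B returns True
import Mathlib
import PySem

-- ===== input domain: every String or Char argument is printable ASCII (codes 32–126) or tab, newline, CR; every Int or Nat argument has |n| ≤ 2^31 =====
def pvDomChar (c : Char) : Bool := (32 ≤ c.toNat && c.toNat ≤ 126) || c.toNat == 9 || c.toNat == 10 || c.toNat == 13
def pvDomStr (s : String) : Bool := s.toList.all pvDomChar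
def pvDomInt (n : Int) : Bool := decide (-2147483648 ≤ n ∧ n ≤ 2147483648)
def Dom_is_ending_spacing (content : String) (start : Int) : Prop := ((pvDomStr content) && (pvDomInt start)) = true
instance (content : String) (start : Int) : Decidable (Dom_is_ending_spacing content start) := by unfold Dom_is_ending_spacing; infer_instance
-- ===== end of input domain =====

-- B replaces A's fused scanning loop by a slice/find/all decomposition (idiomatic, same cost).

-- ===== PORT A =====
-- the while-loop of A: i walks upward while i < len(content)
def isEndingSpacingLoop (content : List Char) (i : Int) : Bool :=
  if _h : i < (content.length : Int) then
    match PySem.List.pyGet? content i with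
    | none => true   -- Python raises IndexError here (i < -len); excluded by Pre_
    | some c =>
      if c = '\n' then true
      else if PySem.Chars.isspace c then isEndingSpacingLoop content (i + 1)
      else false
  else true
termination_by ((content.length : Int) - i).toNat
decreasing_by omega

def is_ending_spacing (content : String) (start : Int) : Bool :=
  isEndingSpacingLoop content.toList start

-- ===== PORT B =====
def is_ending_spacing_alt (content : String) (start : Int) : Bool :=
  let rest := PySem.List.slice content.toList (some start) none      -- content[start:]
  let nl := PySem.Chars.find rest ['\n']                             -- rest.find('\n')
  let seg := if nl = -1 then rest else PySem.List.slice rest none (some nl)  -- rest[:nl]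
  seg.all PySem.Chars.isspace                                        -- all(c.isspace() for c in seg)

-- ===== PRECONDITION & SPEC =====
-- Pre_ excludes the negative starts whose behaviour is not claimed: start < -len, where A raises
-- IndexError, and negative starts addressing a tail of nothing but non-newline spaces, where A's
-- incremented negative index crosses into index 0 and rescans the string from its beginning —
-- an unspecified corner; B just slices the clamped tail.  Other negative starts are admitted:
-- there A stops inside the tail and agrees with B.
def Pre_is_ending_spacing (content : String) (start : Int) : Prop :=
  0 ≤ start ∨
    (-(content.length : Int) ≤ start ∧
      ¬ ((content.toList.drop ((content.length : Int) + start).toNat).all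
            (fun c => PySem.Chars.isspace c && !(c = '\n'))) = true)
instance (content : String) (start : Int) : Decidable (Pre_is_ending_spacing content start) := by unfold Pre_is_ending_spacing; infer_instance

def pvWitness_is_ending_spacing : String × Int := ("x \n y", 1)

def Spec_is_ending_spacing (content : String) (start : Int) (out : Bool) : Prop := out = is_ending_spacing_alt content start
instance (content : String) (start : Int) (out : Bool) : Decidable (Spec_is_ending_spacing content start out) := by unfold Spec_is_ending_spacing; infer_instance

-- ===== CLAIM (what is proved, stated in full; the proofs are below) =====
def Claim_equal_is_ending_spacing : Prop := ∀ (content : String) (start : Int), Dom_is_ending_spacing content start → Pre_is_ending_spacing content start → Spec_is_ending_spacing content start (is_ending_spacing content start)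

-- ===== LEMMAS AND PROOFS =====

-- structural version of A's loop
def aLoopList : List Char → Bool
  | [] => true
  | c :: t => if c = '\n' then true else if PySem.Chars.isspace c then aLoopList t else false

theorem aLoop_eq_aLoopList (l : List Char) (i : Int) (hi : 0 ≤ i) :
    isEndingSpacingLoop l i = aLoopList (l.drop i.toNat) := by
  by_cases h : i < (l.length : Int)
  · have hlt : i.toNat < l.length := by omega
    rw [isEndingSpacingLoop, dif_pos h, PySem.List.pyGet?_eq_some_getElem l hi (by omega),
        List.drop_eq_getElem_cons hlt, aLoopList]
    have hrec := aLoop_eq_aLoopList l (i + 1) (by omega)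
    have h1 : (i + 1).toNat = i.toNat + 1 := by omega
    by_cases hnl : l[i.toNat] = '\n'
    · simp [hnl]
    · by_cases hs : PySem.Chars.isspace l[i.toNat] = true <;> simp [hnl, hs, hrec, h1]
  · rw [isEndingSpacingLoop, dif_neg h, List.drop_eq_nil_of_le (by omega), aLoopList]
termination_by ((l.length : Int) - i).toNat
decreasing_by omega

theorem aLoopList_no_newline (l : List Char) (h : '\n' ∉ l) :
    aLoopList l = l.all PySem.Chars.isspace := by
  induction l with
  | nil => rfl
  | cons c t ih =>
    simp only [List.mem_cons, not_or] at h
    rw [aLoopList, if_neg (fun hc => h.1 hc.symm), List.all_cons, ih h.2]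
    by_cases hs : PySem.Chars.isspace c = true <;> simp [hs]

theorem aLoopList_newline_at (n : Nat) (l : List Char)
    (hn : l[n]? = some '\n') (hlt : ∀ i, i < n → l[i]? ≠ some '\n') :
    aLoopList l = (l.take n).all PySem.Chars.isspace := by
  induction n generalizing l with
  | zero =>
    cases l with
    | nil => simp at hn
    | cons c t =>
      simp only [List.getElem?_cons_zero, Option.some.injEq] at hn
      rw [aLoopList, if_pos hn, List.take_zero, List.all_nil]
  | succ n ih =>
    cases l with
    | nil => simp at hn
    | cons c t =>
      have hc : c ≠ '\n' := by
        intro hc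
        exact hlt 0 (Nat.succ_pos n) (by simp [hc])
      rw [aLoopList, if_neg hc, List.take_succ_cons, List.all_cons]
      have ht := ih t (by simpa using hn)
        (fun i hi => by
          have := hlt (i + 1) (by omega)
          simpa using this)
      by_cases hs : PySem.Chars.isspace c = true <;> simp [hs, ht]

-- negative Python index within range reads from the end
theorem pyGet?_neg_within (l : List Char) (i : Int) (h1 : -(l.length : Int) ≤ i) (h2 : i < 0) :
    PySem.List.pyGet? l i = l[((l.length : Int) + i).toNat]? := by
  have hk : i = -((((-i).toNat : Nat)) : Int) := by omega
  rw [hk, PySem.List.pyGet?_neg_natCast _ _ (by omega) (by omega)]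
  congr 1
  omega

-- A's loop entered at an in-range negative index agrees with the structural scan of the tail,
-- provided the tail contains a stopping character (a newline or a non-space)
theorem aLoop_neg_eq_aLoopList (l : List Char) (i : Int)
    (h1 : -(l.length : Int) ≤ i) (h2 : i < 0)
    (hstop : ¬ ((l.drop ((l.length : Int) + i).toNat).all
        (fun c => PySem.Chars.isspace c && !(c = '\n'))) = true) :
    isEndingSpacingLoop l i = aLoopList (l.drop ((l.length : Int) + i).toNat) := by
  have hn : ((l.length : Int) + i).toNat < l.length := by
    by_contra hge
    rw [List.drop_eq_nil_of_le (by omega)] at hstop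
    simp at hstop
  rw [isEndingSpacingLoop, dif_pos (by omega), pyGet?_neg_within l i h1 h2,
      List.getElem?_eq_getElem hn]
  rw [List.drop_eq_getElem_cons hn] at hstop ⊢
  rw [aLoopList]
  by_cases hnl : l[((l.length : Int) + i).toNat] = '\n'
  · simp [hnl]
  · by_cases hs : PySem.Chars.isspace l[((l.length : Int) + i).toNat] = true
    · have htail : ¬ ((l.drop (((l.length : Int) + i).toNat + 1)).all
          (fun c => PySem.Chars.isspace c && !(c = '\n'))) = true := by
        simp only [List.all_cons, hs, hnl, Bool.and_true, Bool.not_false,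
          Bool.true_and, decide_false] at hstop
        simpa using hstop
      have hi1 : i + 1 < 0 := by
        by_contra hge
        have : ((l.length : Int) + i).toNat + 1 = l.length := by omega
        rw [this, List.drop_length] at htail
        simp at htail
      have := aLoop_neg_eq_aLoopList l (i + 1) (by omega) hi1
        (by
          have : ((l.length : Int) + (i + 1)).toNat = ((l.length : Int) + i).toNat + 1 := by omega
          rw [this]; exact htail)
      have hsh : ((l.length : Int) + (i + 1)).toNat = ((l.length : Int) + i).toNat + 1 := by omega
      rw [hsh] at this
      simp [hnl, hs, this]
    · simp [hnl, hs]
termination_by (-i).toNat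
decreasing_by omega

-- single-character find: the head of the drop characterisation
theorem singleton_prefix_drop_iff (l : List Char) (a : Char) (i : Nat) :
    [a] <+: l.drop i ↔ l[i]? = some a := by
  rw [← List.head?_drop]
  cases hd : l.drop i with
  | nil => simp
  | cons x xs =>
    constructor
    · rintro ⟨s, hs⟩
      simp only [List.singleton_append] at hs
      cases hs
      simp
    · intro hx
      simp only [List.head?_cons, Option.some.injEq] at hx
      exact ⟨xs, by simp [hx]⟩

theorem aLoopList_eq_seg (l : List Char) :
    aLoopList l =
      (if PySem.Chars.find l ['\n'] = -1 then l
       else PySem.List.slice l none (some (PySem.Chars.find l ['\n']))).all PySem.Chars.isspace := by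
  rcases eq_or_lt_of_le (PySem.Chars.neg_one_le_find l ['\n']) with heq | hpos
  · rw [if_pos heq.symm]
    apply aLoopList_no_newline
    intro hmem
    obtain ⟨s, t, hst⟩ := List.append_of_mem hmem
    exact (PySem.Chars.find_eq_neg_one_iff l ['\n']).mp heq.symm ⟨s, t, by simp [hst]⟩
  · have h0 : 0 ≤ PySem.Chars.find l ['\n'] := by omega
    have hne : PySem.Chars.find l ['\n'] ≠ -1 := by omega
    rw [if_neg hne, PySem.List.slice_to _ h0]
    obtain ⟨hpre, hfirst⟩ := PySem.Chars.find_spec h0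
    apply aLoopList_newline_at
    · exact (singleton_prefix_drop_iff l '\n' _).mp hpre
    · intro i hi hcontra
      exact hfirst i hi ((singleton_prefix_drop_iff l '\n' i).mpr hcontra)

-- ===== VERDICT (by name: the statement is the Claim_ definition above) =====
theorem is_ending_spacing_spec : Claim_equal_is_ending_spacing := by
  intro content start _hdom hpre
  unfold Spec_is_ending_spacing is_ending_spacing is_ending_spacing_alt
  by_cases h0 : 0 ≤ start
  · rw [PySem.List.slice_from _ h0, aLoop_eq_aLoopList _ _ h0, aLoopList_eq_seg]
  · unfold Pre_is_ending_spacing at hpre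
    rcases hpre with h | ⟨hge, hstop⟩
    · exact absurd h h0
    · have hltl : content.toList.length = content.length := String.length_toList
      have hge' : -(content.toList.length : Int) ≤ start := by rw [hltl]; exact hge
      have hstop' : ¬ ((content.toList.drop (((content.toList.length : Int)) + start).toNat).all
            (fun c => PySem.Chars.isspace c && !(c = '\n'))) = true := by
        rw [hltl]; exact hstop
      have hcl : PySem.List.clampIdx content.toList.length start
          = (((content.toList.length : Int)) + start).toNat := by
        have hk : start = -((((-start).toNat : Nat)) : Int) := by omega
        rw [hk, PySem.List.clampIdx_neg_natCast _ _ (by omega)]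
        omega
      rw [PySem.List.slice_some_none, hcl,
          aLoop_neg_eq_aLoopList content.toList start hge' (by omega) hstop',
          aLoopList_eq_seg]
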